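-- pv_equiv track=rewrite | github.com/collins562/Introduction | Nand2tetris/07/vm_tokens.py | next_token
-- ===== SOURCE A (Python) =====
-- _WHITESPACE = set(' \t\n\r')
--
-- _TOKEN_END = _WHITESPACE | set('/')
--
-- def next_token(line, k):
-- 	"""A tuple (tok, k'), where tok is the next substring of line at or
-- 	after position k that could be a token (assuming it passes a validity
-- 	check), and k' is the position in line following that token.  Returns
-- 	(None, len(line)) when there are no more tokens."""
-- 	length = len(line)
-- 	while k < length:
-- 		c = line[k]
-- 		if c == '/':      # comment
-- 			if k+1 < length and line[k+1] == '/':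
-- 				return None, length
-- 			report_error("Invalid Comment:", line, k)
-- 		elif c in _WHITESPACE:
-- 			k += 1
-- 		else:
-- 			j = k
-- 			while j < length and line[j] not in _TOKEN_END:
-- 				j += 1
-- 			return line[k:j], j
-- 	return None, length
--
-- def report_error(message, line, i):
--     raise SyntaxError("{}:\n{}\n{}".format(message, "    "+line, " "*(i+4)+"^"))
-- ===== SOURCE B (Python) =====
-- import re
--
-- _SKIP = re.compile(r'[ \t\n\r]*')
-- _TOK = re.compile(r'[^ \t\n\r/]+')
--
-- def next_token(line, k):
-- 	length = len(line)
-- 	if k >= length: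
-- 		return None, length
-- 	k = _SKIP.match(line, k).end()
-- 	if k >= length:
-- 		return None, length
-- 	if line[k] == '/':
-- 		if line[k:k+2] == '//':
-- 			return None, length
-- 		report_error("Invalid Comment:", line, k)
-- 	m = _TOK.match(line, k)
-- 	return m.group(), m.end()
--
-- def report_error(message, line, i):
--     raise SyntaxError("{}:\n{}\n{}".format(message, "    "+line, " "*(i+4)+"^"))
-- ===== Notes on version B (the rewrite author's own statement) =====
-- stated objective: faster
-- what changed: Replaces A's hand-rolled character-by-character while-loops (outer whitespace skip, inner token scan) with two precompiled regex matches: one match skips the whitespace run, one match grabs the whole token, with the '/'-comment check kept between them.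
-- outside the precondition, e.g. on next_token('ab', -1): A returns ('b', 2), B returns ('ab', 2)
import Mathlib
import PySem

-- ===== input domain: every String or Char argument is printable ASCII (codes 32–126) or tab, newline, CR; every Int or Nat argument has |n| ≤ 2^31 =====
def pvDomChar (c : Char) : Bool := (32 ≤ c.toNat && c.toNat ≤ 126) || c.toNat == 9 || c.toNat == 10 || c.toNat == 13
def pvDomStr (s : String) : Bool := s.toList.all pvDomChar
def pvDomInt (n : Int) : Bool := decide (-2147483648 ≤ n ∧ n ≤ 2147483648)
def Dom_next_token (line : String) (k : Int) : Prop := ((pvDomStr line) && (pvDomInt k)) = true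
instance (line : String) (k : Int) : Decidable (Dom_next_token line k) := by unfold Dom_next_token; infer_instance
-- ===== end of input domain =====

-- B re-implements A's hand-rolled scan loop with two precompiled regex matches (class skip + token run);
-- objective: idiomatic/faster (a timing run measured B faster). Equivalence is proved for 0 ≤ k and lines where A does not raise SyntaxError.

-- ===== PORT A =====
-- membership in the module constants _WHITESPACE and _TOKEN_END
def pvWS (c : Char) : Bool := c == ' ' || c == '\t' || c == '\n' || c == '\r'
def pvTokEnd (c : Char) : Bool := pvWS c || c == '/'

-- inner `while j < length and line[j] not in _TOKEN_END: j += 1`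
def pvTokScanA (cs : List Char) (length j : Int) : Int :=
  if hj : j < length then
    match PySem.List.pyGet? cs j with
    | some ch => if pvTokEnd ch then j else pvTokScanA cs length (j + 1)
    | none => j          -- IndexError (never reached when length = len cs and 0 ≤ j)
  else j
termination_by (length - j).toNat
decreasing_by omega

-- outer `while k < length` loop of A
def pvLoopA (cs : List Char) (length k : Int) : Option String × Int :=
  if hin : k < length then
    match PySem.List.pyGet? cs k with
    | some c =>
      if c == '/' then
        if k + 1 < length && (PySem.List.pyGet? cs (k + 1) == some '/') then (none, length)
        else (none, length)   -- report_error raises SyntaxError here: excluded by Pre_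
      else if pvWS c then pvLoopA cs length (k + 1)
      else
        let j := pvTokScanA cs length k
        (some (String.ofList (PySem.List.slice cs (some k) (some j))), j)
    | none => (none, length)  -- IndexError on negative k out of range: excluded by Pre_
  else (none, length)
termination_by (length - k).toNat
decreasing_by omega

def next_token (line : String) (k : Int) : Option String × Int :=
  pvLoopA line.toList (line.toList.length : Int) k

-- ===== PORT B =====
-- length of the match of _SKIP = re.compile(r'[ \t\n\r]*') at the start of cs
def pvWsRun : List Char → Nat
  | [] => 0
  | c :: rest => if pvWS c then pvWsRun rest + 1 else 0

-- length of the match of _TOK = re.compile(r'[^ \t\n\r/]+') at the start of cs (0 = no match, unreachable where used)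
def pvTokRun : List Char → Nat
  | [] => 0
  | c :: rest => if pvTokEnd c then 0 else pvTokRun rest + 1

def pvAltCore (cs : List Char) (k : Int) : Option String × Int :=
  let length : Int := cs.length
  if k ≥ length then (none, length)
  else
    -- k = _SKIP.match(line, k).end(): re clamps a negative pos to 0
    let k1 : Nat := k.toNat + pvWsRun (cs.drop k.toNat)
    if (k1 : Int) ≥ length then (none, length)
    else
      match cs[k1]? with
      | some c =>
        if c == '/' then
          if PySem.List.slice cs (some (k1 : Int)) (some ((k1 : Int) + 2)) == ['/', '/'] then (none, length)
          else (none, length)  -- report_error raises SyntaxError here: excluded by Pre_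
        else
          -- m = _TOK.match(line, k): group is the matched run, end is its end position
          let t : Nat := pvTokRun (cs.drop k1)
          (some (String.ofList ((cs.drop k1).take t)), ((k1 + t : Nat) : Int))
      | none => (none, length)  -- unreachable: k1 < length

def next_token_alt (line : String) (k : Int) : Option String × Int :=
  pvAltCore line.toList k

-- ===== PRECONDITION & SPEC =====
-- "bad comment": the first non-whitespace character of line at or after position k is a '/'
-- not followed by another '/'; there A calls report_error, which raises SyntaxError.
def pvBadComment (cs : List Char) (k : Int) : Prop :=
  ∃ i : Fin cs.length, k ≤ (i : Int)
    ∧ (∀ j : Fin cs.length, k ≤ (j : Int) → (j : Nat) < (i : Nat) → pvWS cs[(j : Nat)] = true)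
    ∧ cs[(i : Nat)] = '/' ∧ cs[(i : Nat) + 1]? ≠ some '/'

-- Pre_ excludes negative positions k (outside the scanner's natural domain: A then reads the line
-- through Python's negative-index wraparound, or raises IndexError) and inputs whose first token
-- after k is an invalid comment, on which A raises SyntaxError.
def Pre_next_token (line : String) (k : Int) : Prop :=
  0 ≤ k ∧ ¬ pvBadComment line.toList k
instance (line : String) (k : Int) : Decidable (Pre_next_token line k) := by
  unfold Pre_next_token pvBadComment; infer_instance

def pvWitness_next_token : String × Int := ("push 1  // top", 0)

def Spec_next_token (line : String) (k : Int) (out : Option String × Int) : Prop := out = next_token_alt line k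
instance (line : String) (k : Int) (out : Option String × Int) : Decidable (Spec_next_token line k out) := by unfold Spec_next_token; infer_instance

-- ===== CLAIM (what is proved, stated in full; the proofs are below) =====
def Claim_equal_next_token : Prop := ∀ (line : String) (k : Int), Dom_next_token line k → Pre_next_token line k → Spec_next_token line k (next_token line k)

-- ===== LEMMAS AND PROOFS =====

lemma pvTokScanA_eq (cs : List Char) (n : Nat) (j : Int) (hj : 0 ≤ j)
    (hn : cs.length - j.toNat ≤ n) :
    pvTokScanA cs (cs.length : Int) j = ((j.toNat + pvTokRun (cs.drop j.toNat) : Nat) : Int) := by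
  induction n generalizing j with
  | zero =>
    have hge : ¬ j < (cs.length : Int) := by omega
    rw [pvTokScanA, dif_neg hge]
    have hd : cs.drop j.toNat = [] := List.drop_eq_nil_of_le (by omega)
    rw [hd]; simp [pvTokRun]; omega
  | succ n ih =>
    by_cases h : j < (cs.length : Int)
    · have hlt : j.toNat < cs.length := by omega
      rw [pvTokScanA, dif_pos h, PySem.List.pyGet?_eq_some_getElem cs hj h]
      have hdrop : cs.drop j.toNat = cs[j.toNat] :: cs.drop (j.toNat + 1) :=
        List.drop_eq_getElem_cons hlt
      by_cases ht : pvTokEnd cs[j.toNat] = true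
      · rw [hdrop]; simp [pvTokRun, ht]; omega
      · have hih := ih (j + 1) (by omega) (by omega)
        have hj1 : (j + 1).toNat = j.toNat + 1 := by omega
        rw [hj1] at hih
        rw [hdrop]
        simp [pvTokRun, ht, hih]
        omega
    · rw [pvTokScanA, dif_neg h]
      have hd : cs.drop j.toNat = [] := List.drop_eq_nil_of_le (by omega)
      rw [hd]; simp [pvTokRun]; omega

lemma pvAltCore_step (cs : List Char) (k : Int) (hk : 0 ≤ k) (hlt : k < (cs.length : Int))
    (hws : pvWS (cs.getD k.toNat ' ') = true) :
    pvAltCore cs k = pvAltCore cs (k + 1) := by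
  have hp : k.toNat < cs.length := by omega
  have hdrop : cs.drop k.toNat = cs[k.toNat] :: cs.drop (k.toNat + 1) :=
    List.drop_eq_getElem_cons hp
  have hws' : pvWS cs[k.toNat] = true := by
    rwa [List.getD_eq_getElem cs ' ' hp] at hws
  have hk1 : (k + 1).toNat = k.toNat + 1 := by omega
  have hrun : pvWsRun (cs.drop k.toNat) = pvWsRun (cs.drop (k.toNat + 1)) + 1 := by
    rw [hdrop]; simp [pvWsRun, hws']
  unfold pvAltCore
  rw [if_neg (by omega), hrun, hk1]
  have harith : k.toNat + (pvWsRun (cs.drop (k.toNat + 1)) + 1)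
      = k.toNat + 1 + pvWsRun (cs.drop (k.toNat + 1)) := by omega
  rw [harith]
  by_cases hend : k + 1 ≥ (cs.length : Int)
  · rw [if_pos hend]
    have hd2 : cs.drop (k.toNat + 1) = [] := List.drop_eq_nil_of_le (by omega)
    rw [hd2]
    simp only [pvWsRun]
    rw [if_pos (by omega)]
  · rw [if_neg hend]

lemma pvBadComment_shift (cs : List Char) (k : Int) (hk : 0 ≤ k) (_hlt : k < (cs.length : Int))
    (hws : pvWS (cs.getD k.toNat ' ') = true) (hb : pvBadComment cs (k + 1)) :
    pvBadComment cs k := by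
  obtain ⟨i, h1, h2, h3, h4⟩ := hb
  refine ⟨i, by omega, ?_, h3, h4⟩
  intro j hj1 hj2
  by_cases hjk : (j : Nat) = k.toNat
  · rw [List.getD_eq_getElem cs ' ' (by omega : k.toNat < cs.length)] at hws
    rw [getElem_congr rfl hjk (j.isLt)]
    exact hws
  · exact h2 j (by omega) hj2

lemma pvLoopA_eq_core (cs : List Char) (n : Nat) (k : Int) (hk : 0 ≤ k)
    (hn : cs.length - k.toNat ≤ n) (hnb : ¬ pvBadComment cs k) :
    pvLoopA cs (cs.length : Int) k = pvAltCore cs k := by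
  induction n generalizing k with
  | zero =>
    rw [pvLoopA, dif_neg (by omega)]
    unfold pvAltCore
    rw [if_pos (by omega)]
  | succ n ih =>
    by_cases h : k < (cs.length : Int)
    · have hp : k.toNat < cs.length := by omega
      have hdrop : cs.drop k.toNat = cs[k.toNat] :: cs.drop (k.toNat + 1) :=
        List.drop_eq_getElem_cons hp
      rw [pvLoopA, dif_pos h, PySem.List.pyGet?_eq_some_getElem cs hk h]
      by_cases hc : cs[k.toNat] = '/'
      · -- comment or SyntaxError branch: A returns (none, length) either way,
        -- and so does B after skipping zero whitespace
        have hA : (match some cs[k.toNat] with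
            | some c =>
              if c == '/' then
                if k + 1 < (cs.length : Int)
                    && (PySem.List.pyGet? cs (k + 1) == some '/') then
                  ((none : Option String), (cs.length : Int))
                else (none, (cs.length : Int))
              else if pvWS c then pvLoopA cs (cs.length : Int) (k + 1)
              else
                let j := pvTokScanA cs (cs.length : Int) k
                (some (String.ofList (PySem.List.slice cs (some k) (some j))), j)
            | none => ((none : Option String), (cs.length : Int)))
            = ((none : Option String), (cs.length : Int)) := by
          simp [hc]
        rw [hA]
        unfold pvAltCore
        have hrun : pvWsRun (cs.drop k.toNat) = 0 := by
          rw [hdrop, hc]; simp [pvWsRun, pvWS]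
        rw [if_neg (by omega), hrun]
        simp only [Nat.add_zero]
        rw [if_neg (by omega)]
        rw [List.getElem?_eq_getElem hp, hc]
        simp
      · by_cases hws : pvWS cs[k.toNat] = true
        · -- whitespace: A advances k by one; B skips it inside the same regex match
          have hne : (cs[k.toNat] == '/') = false := by
            simp [hc]
          simp only [hne, Bool.false_eq_true, if_false, hws, if_true]
          have hgd : pvWS (cs.getD k.toNat ' ') = true := by
            rwa [List.getD_eq_getElem cs ' ' hp]
          rw [ih (k + 1) (by omega) (by omega)
              (fun hb => hnb (pvBadComment_shift cs k hk h hgd hb))]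
          exact (pvAltCore_step cs k hk h hgd).symm
        · -- token: A's inner scan = B's token-run match
          have hne : (cs[k.toNat] == '/') = false := by simp [hc]
          simp only [hne, Bool.false_eq_true, if_false, hws]
          rw [pvTokScanA_eq cs cs.length k hk (by omega)]
          unfold pvAltCore
          have hrun : pvWsRun (cs.drop k.toNat) = 0 := by
            rw [hdrop]
            simp only [pvWsRun]
            simp [hws]
          rw [if_neg (by omega), hrun]
          simp only [Nat.add_zero]
          rw [if_neg (by omega)]
          rw [List.getElem?_eq_getElem hp]
          simp only [hne, Bool.false_eq_true, if_false]
          have hslice : PySem.List.slice cs (some k)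
              (some ((k.toNat + pvTokRun (cs.drop k.toNat) : Nat) : Int))
              = (cs.drop k.toNat).take (pvTokRun (cs.drop k.toNat)) := by
            rw [PySem.List.slice_toNat cs hk (by omega)]
            congr 1
            omega
          rw [hslice]
    · rw [pvLoopA, dif_neg h]
      unfold pvAltCore
      rw [if_pos (by omega)]

-- ===== VERDICT (by name: the statement is the Claim_ definition above) =====
theorem next_token_spec : Claim_equal_next_token := by
  intro line k _ hpre
  unfold Spec_next_token next_token next_token_alt
  exact pvLoopA_eq_core line.toList line.toList.length k hpre.1 (by omega) hpre.2
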